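-- pv_equiv track=rewrite | github.com/phamnhathuyhuynh-collab/Project-CS | LeetCodeDSA/3814.py | maxCapacity
-- ===== SOURCE A (Python) =====
-- def maxCapacity(costs, capacity, budget):
--     arr  = []
--     longueur = len(costs)
--     for i in range(longueur):
--         if costs[i] < budget:
--             arr.append(capacity[i])
--     for i in range(longueur - 1):
--         for j in range(i + 1, longueur, 1):
--             if costs[i] + costs[j] < budget:
--                 arr.append(capacity[i] + capacity[j])
--     return max(arr) if len(arr) != 0 else 0
-- ===== SOURCE B (Python) =====
-- def maxCapacity(costs, capacity, budget):
--     # Sort items by cost; for each item, binary-search the largest prefix of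
--     # cheaper-sorted items usable as a partner and pair with the prefix-max capacity.
--     items = sorted(zip(costs, capacity), key=lambda t: t[0])
--     cs = [c for c, _ in items]
--     pmax = []
--     m = None
--     for _, cap in items:
--         m = cap if m is None or cap > m else m
--         pmax.append(m)
--     best = None
--     for j, (c, cap) in enumerate(items):
--         if c < budget and (best is None or cap > best):
--             best = cap
--         t = budget - c
--         lo, hi = 0, j
--         while lo < hi:
--             mid = (lo + hi) // 2
--             if cs[mid] < t:
--                 lo = mid + 1
--             else:
--                 hi = mid
--         if lo > 0:
--             cand = pmax[lo - 1] + cap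
--             if best is None or cand > best:
--                 best = cand
--     return best if best is not None else 0
-- ===== Notes on version B (the rewrite author's own statement) =====
-- stated objective: faster
-- what changed: Replaces A's O(n^2) scan over all index pairs by sorting items by cost, precomputing a prefix maximum of capacities, and binary-searching per item for the largest prefix of affordable partners.
import Mathlib
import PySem

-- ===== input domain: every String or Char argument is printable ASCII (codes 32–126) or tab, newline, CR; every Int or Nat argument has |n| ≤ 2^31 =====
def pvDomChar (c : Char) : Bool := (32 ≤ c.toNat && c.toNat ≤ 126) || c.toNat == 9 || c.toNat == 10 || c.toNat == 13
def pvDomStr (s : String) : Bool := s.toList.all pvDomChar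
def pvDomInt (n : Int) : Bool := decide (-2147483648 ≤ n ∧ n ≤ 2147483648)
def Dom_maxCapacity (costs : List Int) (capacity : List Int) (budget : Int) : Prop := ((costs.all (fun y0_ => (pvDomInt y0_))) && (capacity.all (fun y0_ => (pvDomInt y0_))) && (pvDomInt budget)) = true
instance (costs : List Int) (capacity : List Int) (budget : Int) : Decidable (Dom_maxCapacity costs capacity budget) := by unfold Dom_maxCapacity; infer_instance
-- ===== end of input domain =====

-- B replaces A's quadratic all-pairs scan by sort-by-cost + prefix-max + per-item binary search
-- (same return value on Pre_; O(n log n) instead of O(n^2)).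

-- ===== PORT A =====
-- literal transliteration of A: two index loops appending to arr, then max(arr) if nonempty else 0
def maxCapacity (costs : List Int) (capacity : List Int) (budget : Int) : Int :=
  let n := costs.length
  let arr : List Int := (List.range n).foldl (fun arr i =>
      if costs.getD i 0 < budget then arr ++ [capacity.getD i 0] else arr) []
  let arr : List Int := (List.range (n - 1)).foldl (fun arr i =>
      (List.range' (i + 1) (n - (i + 1))).foldl (fun arr j =>
        if costs.getD i 0 + costs.getD j 0 < budget then
          arr ++ [capacity.getD i 0 + capacity.getD j 0]
        else arr) arr) arr
  if arr.length ≠ 0 then (PySem.List.max? arr (fun y => y)).getD 0 else 0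

-- ===== PORT B =====
-- the hand-written 'while lo < hi' binary search of Source B (counts the partner prefix)
def pvBsearch (cs : List Int) (t : Int) (lo hi : Nat) : Nat :=
  if lo < hi then
    let mid := (lo + hi) / 2
    if cs.getD mid 0 < t then pvBsearch cs t (mid + 1) hi else pvBsearch cs t lo mid
  else lo
termination_by hi - lo
decreasing_by all_goals omega

-- body of Source B's prefix-max loop (state: pmax list, running max m)
def pvPrefStep (st : List Int × Option Int) (it : Int × Int) : List Int × Option Int :=
  let m : Int := match st.2 with | none => it.2 | some mm => if it.2 > mm then it.2 else mm
  (st.1 ++ [m], some m)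

-- body of Source B's main loop over enumerate(items)
def pvStep (budget : Int) (cs pm : List Int) (best : Option Int) (p : (Int × Int) × Nat) : Option Int :=
  let c := p.1.1
  let cap := p.1.2
  let j := p.2
  let best1 : Option Int :=
    if c < budget then
      (match best with | none => some cap | some b => if cap > b then some cap else some b)
    else best
  let lo := pvBsearch cs (budget - c) 0 j
  if 0 < lo then
    let cand := pm.getD (lo - 1) 0 + cap
    (match best1 with | none => some cand | some b => if cand > b then some cand else some b)
  else best1

def maxCapacity_alt (costs : List Int) (capacity : List Int) (budget : Int) : Int :=
  let items := PySem.List.sorted (costs.zip capacity) (fun t => t.1) false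
  let cs := items.map (fun p => p.1)
  let pm := (items.foldl pvPrefStep ([], none)).1
  let best := items.zipIdx.foldl (pvStep budget cs pm) none
  match best with | none => 0 | some b => b

-- ===== PRECONDITION & SPEC =====
-- Pre_ excludes exactly the inputs on which A raises IndexError: an index beyond
-- capacity's length passes a budget test, so A reads capacity out of range.
def Pre_maxCapacity (costs : List Int) (capacity : List Int) (budget : Int) : Prop :=
  ∀ i, i < costs.length → capacity.length ≤ i →
    budget ≤ costs.getD i 0 ∧ ∀ j, j < i → budget ≤ costs.getD j 0 + costs.getD i 0
instance (costs : List Int) (capacity : List Int) (budget : Int) : Decidable (Pre_maxCapacity costs capacity budget) := by unfold Pre_maxCapacity; infer_instance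

def pvWitness_maxCapacity : List Int × List Int × Int := ([1, 4, 2], [3, -1, 5], 6)

def Spec_maxCapacity (costs : List Int) (capacity : List Int) (budget : Int) (out : Int) : Prop := out = maxCapacity_alt costs capacity budget
instance (costs : List Int) (capacity : List Int) (budget : Int) (out : Int) : Decidable (Spec_maxCapacity costs capacity budget out) := by unfold Spec_maxCapacity; infer_instance

-- ===== CLAIM (what is proved, stated in full; the proofs are below) =====
def Claim_equal_maxCapacity : Prop := ∀ (costs : List Int) (capacity : List Int) (budget : Int), Dom_maxCapacity costs capacity budget → Pre_maxCapacity costs capacity budget → Spec_maxCapacity costs capacity budget (maxCapacity costs capacity budget)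

-- ===== LEMMAS AND PROOFS =====

-- `HasPair P l`: some two elements of l, in order of occurrence, satisfy P
def HasPair (P : Int × Int → Int × Int → Prop) : List (Int × Int) → Prop
  | [] => False
  | x :: l => (∃ y ∈ l, P x y) ∨ HasPair P l

def PairP (B v : Int) (a b : Int × Int) : Prop := a.1 + b.1 < B ∧ v = a.2 + b.2

-- the candidate values both programs maximise over: single items under budget, and pairs under budget
def Good (L : List (Int × Int)) (B v : Int) : Prop :=
  (∃ q ∈ L, q.1 < B ∧ v = q.2) ∨ HasPair (PairP B v) L

-- `o` is the running maximum of the value set G (none ↔ G empty)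
def MaxOpt (G : Int → Prop) : Option Int → Prop
  | none => ∀ v, ¬ G v
  | some b => G b ∧ ∀ v, G v → v ≤ b

-- `r` is the returned value for candidate set G: max of G, or 0 when G is empty
def ResOf (G : Int → Prop) (r : Int) : Prop :=
  (r = 0 ∧ ∀ v, ¬ G v) ∨ (G r ∧ ∀ v, G v → v ≤ r)

lemma resOf_unique {G H : Int → Prop} {r s : Int} (hGH : ∀ v, G v ↔ H v)
    (hr : ResOf G r) (hs : ResOf H s) : r = s := by
  rcases hr with ⟨h0, hemp⟩ | ⟨hg, hmax⟩
  · rcases hs with ⟨h0', _⟩ | ⟨hh, _⟩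
    · omega
    · exact absurd ((hGH s).mpr hh) (hemp s)
  · rcases hs with ⟨_, hemp'⟩ | ⟨hh, hmax'⟩
    · exact absurd ((hGH r).mp hg) (hemp' r)
    · exact le_antisymm (hmax' r ((hGH r).mp hg)) (hmax s ((hGH s).mpr hh))

lemma hasPair_perm_mp {P : Int × Int → Int × Int → Prop}
    (hsym : ∀ a b, P a b → P b a) {l₁ l₂ : List (Int × Int)} (h : l₁.Perm l₂) :
    HasPair P l₁ → HasPair P l₂ := by
  induction h with
  | nil => exact id
  | cons x h ih =>
      rintro (⟨y, hy, hP⟩ | hp)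
      · exact Or.inl ⟨y, h.mem_iff.mp hy, hP⟩
      · exact Or.inr (ih hp)
  | swap x y l =>
      rintro (⟨z, hz, hP⟩ | ⟨z, hz, hP⟩ | hp)
      · rcases List.mem_cons.mp hz with rfl | hz
        · exact Or.inl ⟨y, List.mem_cons_self .., hsym _ _ hP⟩
        · exact Or.inr (Or.inl ⟨z, hz, hP⟩)
      · exact Or.inl ⟨z, List.mem_cons_of_mem _ hz, hP⟩
      · exact Or.inr (Or.inr hp)
  | trans _ _ ih₁ ih₂ => exact fun hp => ih₂ (ih₁ hp)

lemma hasPair_iff_idx (P : Int × Int → Int × Int → Prop) (l : List (Int × Int)) :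
    HasPair P l ↔ ∃ i j : Nat, i < j ∧ j < l.length ∧ P (l.getD i (0,0)) (l.getD j (0,0)) := by
  induction l with
  | nil => simp [HasPair]
  | cons x l ih =>
      constructor
      · rintro (⟨y, hy, hP⟩ | hp)
        · rcases List.mem_iff_getElem.mp hy with ⟨j, hj, rfl⟩
          exact ⟨0, j + 1, by omega, by simp; omega,
            by simp only [List.getD_cons_zero, List.getD_cons_succ]
               rw [List.getD_eq_getElem _ _ hj]; exact hP⟩
        · rcases ih.mp hp with ⟨i, j, hij, hj, hP⟩
          refine ⟨i + 1, j + 1, by omega, by simp; omega, ?_⟩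
          simpa [List.getD_cons_succ] using hP
      · rintro ⟨i, j, hij, hj, hP⟩
        cases i with
        | zero =>
            refine Or.inl ⟨l.getD (j - 1) (0,0), ?_, ?_⟩
            · have hj' : j - 1 < l.length := by simp at hj; omega
              rw [List.getD_eq_getElem _ _ hj']
              exact List.getElem_mem _
            · obtain ⟨j', rfl⟩ : ∃ j', j = j' + 1 := ⟨j - 1, by omega⟩
              simpa [List.getD_cons_succ] using hP
        | succ i =>
            obtain ⟨j', rfl⟩ : ∃ j', j = j' + 1 := ⟨j - 1, by omega⟩
            refine Or.inr (ih.mpr ⟨i, j', by omega, by simp at hj; omega, ?_⟩)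
            simpa [List.getD_cons_succ] using hP

lemma zip_getD {c p : List Int} {i : Nat} (h1 : i < c.length) (h2 : i < p.length) :
    (c.zip p).getD i (0,0) = (c.getD i 0, p.getD i 0) := by
  have hz : i < (c.zip p).length := by simp; omega
  rw [List.getD_eq_getElem _ _ hz, List.getElem_zip, List.getD_eq_getElem _ _ h1,
    List.getD_eq_getElem _ _ h2]

-- ---------- A-side characterisation ----------

def aArr (costs capacity : List Int) (budget : Int) : List Int :=
  ((List.range costs.length).filter (fun i => decide (costs.getD i 0 < budget))).map
      (fun i => capacity.getD i 0)
    ++ (List.range (costs.length - 1)).flatMap (fun i =>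
        ((List.range' (i + 1) (costs.length - (i + 1))).filter
            (fun j => decide (costs.getD i 0 + costs.getD j 0 < budget))).map
          (fun j => capacity.getD i 0 + capacity.getD j 0))

lemma maxCapacity_eq (costs capacity : List Int) (budget : Int) :
    maxCapacity costs capacity budget =
      if (aArr costs capacity budget).length ≠ 0 then
        (PySem.List.max? (aArr costs capacity budget) (fun y => y)).getD 0
      else 0 := by
  simp only [maxCapacity, aArr]
  rw [PySem.List.foldl_append_ite (fun i => costs.getD i 0 < budget) (fun i => capacity.getD i 0)]
  simp only [PySem.List.foldl_append_ite, PySem.List.foldl_append_eq_flatMap, List.nil_append]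

lemma mem_aArr {costs capacity : List Int} {budget : Int}
    (hpre : Pre_maxCapacity costs capacity budget) (v : Int) :
    v ∈ aArr costs capacity budget ↔ Good (costs.zip capacity) budget v := by
  have hzl : (costs.zip capacity).length = min costs.length capacity.length := by simp
  have hcap1 : ∀ i, i < costs.length → costs.getD i 0 < budget → i < capacity.length := by
    intro i hi hc
    by_contra h
    exact absurd hc (not_lt.mpr (hpre i hi (by omega)).1)
  have hcap2 : ∀ i j, i < j → j < costs.length →
      costs.getD i 0 + costs.getD j 0 < budget → j < capacity.length := by
    intro i j hij hj hc
    by_contra h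
    exact absurd hc (not_lt.mpr ((hpre j hj (by omega)).2 i hij))
  unfold Good
  rw [hasPair_iff_idx]
  simp only [aArr, List.mem_append, List.mem_map, List.mem_filter, List.mem_range,
    List.mem_flatMap, List.mem_range'_1, decide_eq_true_eq, PairP]
  constructor
  · rintro (⟨i, ⟨hi, hc⟩, rfl⟩ | ⟨i, hi, j, ⟨⟨hj1, hj2⟩, hc⟩, rfl⟩)
    · have hic : i < capacity.length := hcap1 i hi hc
      refine Or.inl ⟨(costs.zip capacity).getD i (0,0), ?_, ?_⟩
      · rw [List.getD_eq_getElem _ _ (by omega)]; exact List.getElem_mem _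
      · rw [zip_getD hi hic]; exact ⟨hc, rfl⟩
    · have hjc : j < capacity.length := hcap2 i j (by omega) (by omega) hc
      refine Or.inr ⟨i, j, by omega, by omega, ?_⟩
      rw [zip_getD (by omega) (by omega), zip_getD (by omega) hjc]
      exact ⟨hc, rfl⟩
  · rintro (⟨q, hq, hc, rfl⟩ | ⟨i, j, hij, hj, hc, hv⟩)
    · rcases List.mem_iff_getElem.mp hq with ⟨i, hi, rfl⟩
      have hi' : i < costs.length := by omega
      have hic : i < capacity.length := by omega
      refine Or.inl ⟨i, ⟨hi', ?_⟩, ?_⟩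
      · have := zip_getD (c := costs) (p := capacity) (i := i) hi' hic
        rw [List.getD_eq_getElem _ _ hi] at this
        rw [show (costs.zip capacity)[i].fst = costs.getD i 0 from by rw [this]] at hc
        exact hc
      · have := zip_getD (c := costs) (p := capacity) (i := i) hi' hic
        rw [List.getD_eq_getElem _ _ hi] at this
        rw [this]
    · rw [hzl] at hj
      rw [zip_getD (by omega) (by omega), zip_getD (by omega) (by omega)] at hc hv
      exact Or.inr ⟨i, ⟨by omega, j, ⟨⟨by omega, by omega⟩, hc⟩, hv.symm⟩⟩

lemma A_resOf {costs capacity : List Int} {budget : Int}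
    (hpre : Pre_maxCapacity costs capacity budget) :
    ResOf (Good (costs.zip capacity) budget) (maxCapacity costs capacity budget) := by
  rw [maxCapacity_eq]
  by_cases hnil : aArr costs capacity budget = []
  · rw [if_neg (by simp [hnil])]
    exact Or.inl ⟨rfl, fun v hv => absurd ((mem_aArr hpre v).mpr hv) (by simp [hnil])⟩
  · have hlen0 : (aArr costs capacity budget).length ≠ 0 := by simpa using hnil
    rcases hm : PySem.List.max? (aArr costs capacity budget) (fun y => y) with _ | m
    · exact absurd ((PySem.List.max?_eq_none_iff _ _).mp hm) hnil
    · rw [if_pos hlen0]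
      refine Or.inr ⟨?_, fun v hv => ?_⟩
      · simpa using (mem_aArr hpre m).mp (PySem.List.max?_mem hm)
      · simpa using PySem.List.max?_isMax hm v ((mem_aArr hpre v).mpr hv)

-- ---------- B-side characterisation ----------

lemma pvBsearch_spec (cs : List Int) (t : Int) (j : Nat) (hj : j ≤ cs.length)
    (hsort : ∀ p q : Nat, p ≤ q → q < cs.length → cs.getD p 0 ≤ cs.getD q 0) :
    ∀ lo hi : Nat, lo ≤ hi → hi ≤ j →
      (∀ k, k < lo → cs.getD k 0 < t) → (∀ k, hi ≤ k → k < j → t ≤ cs.getD k 0) →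
      pvBsearch cs t lo hi ≤ hi ∧
        (∀ k, k < pvBsearch cs t lo hi → cs.getD k 0 < t) ∧
        (∀ k, pvBsearch cs t lo hi ≤ k → k < j → t ≤ cs.getD k 0) := by
  have H : ∀ (fuel lo hi : Nat), hi - lo ≤ fuel → lo ≤ hi → hi ≤ j →
      (∀ k, k < lo → cs.getD k 0 < t) → (∀ k, hi ≤ k → k < j → t ≤ cs.getD k 0) →
      pvBsearch cs t lo hi ≤ hi ∧
        (∀ k, k < pvBsearch cs t lo hi → cs.getD k 0 < t) ∧
        (∀ k, pvBsearch cs t lo hi ≤ k → k < j → t ≤ cs.getD k 0) := by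
    intro fuel
    induction fuel with
    | zero =>
        intro lo hi hf hle hhj hlo hhi
        have : lo = hi := by omega
        rw [pvBsearch, if_neg (by omega)]
        exact ⟨hle, fun k hk => hlo k (by omega), fun k hk1 hk2 => hhi k (by omega) hk2⟩
    | succ fuel ih =>
        intro lo hi hf hle hhj hlo hhi
        by_cases hlh : lo < hi
        · rw [pvBsearch, if_pos hlh]
          set mid := (lo + hi) / 2 with hmid
          have hm1 : lo ≤ mid := by omega
          have hm2 : mid < hi := by omega
          by_cases hc : cs.getD mid 0 < t
          · rw [if_pos hc]
            refine ih (mid + 1) hi (by omega) (by omega) hhj ?_ hhi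
            intro k hk
            exact lt_of_le_of_lt (hsort k mid (by omega) (by omega)) hc
          · rw [if_neg hc]
            refine (ih lo mid (by omega) (by omega) (by omega) hlo ?_).imp (by omega) id
            intro k hk1 hk2
            exact le_trans (not_lt.mp hc) (hsort mid k hk1 (by omega))
        · rw [pvBsearch, if_neg hlh]
          exact ⟨hle, fun k hk => hlo k (by omega), fun k hk1 hk2 => hhi k (by omega) hk2⟩
  intro lo hi hle hhj hlo hhi
  exact H (hi - lo) lo hi le_rfl hle hhj hlo hhi


lemma pfold_spec (l : List (Int × Int)) :
    (l.foldl pvPrefStep ([], none)).1.length = l.length ∧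
    (l.foldl pvPrefStep ([], none)).2 = (l.foldl pvPrefStep ([], none)).1.getLast? ∧
    ∀ k, k < l.length →
      (∃ i, i ≤ k ∧ (l.foldl pvPrefStep ([], none)).1.getD k 0 = (l.getD i (0,0)).2) ∧
      ∀ i, i ≤ k → (l.getD i (0,0)).2 ≤ (l.foldl pvPrefStep ([], none)).1.getD k 0 := by
  induction l using List.reverseRecOn with
  | nil => simp
  | append_singleton l x ih =>
      obtain ⟨ihlen, ihlast, ihspec⟩ := ih
      rw [List.foldl_append] at *
      set st := l.foldl pvPrefStep ([], none) with hst
      set newm : Int := match st.2 with | none => x.2 | some mm => if x.2 > mm then x.2 else mm with hnm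
      have hstep : List.foldl pvPrefStep st [x] = (st.1 ++ [newm], some newm) := by
        simp [pvPrefStep, hnm]
      rw [hstep]
      have hlen' : (st.1 ++ [newm]).length = (l ++ [x]).length := by simp [ihlen]
      refine ⟨hlen', by simp, ?_⟩
      -- max property of newm over all of l ++ [x]
      have hnew_mem : ∃ i, i ≤ l.length ∧ newm = ((l ++ [x]).getD i (0,0)).2 := by
        rcases h2 : st.2 with _ | mm
        · -- st.2 = none → st.1.getLast? = none → st.1 = [] → l = []
          have : st.1 = [] := by rw [ihlast] at h2; exact List.getLast?_eq_none_iff.mp h2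
          have hl0 : l = [] := by
            rw [this] at ihlen; exact List.eq_nil_of_length_eq_zero (by simpa using ihlen.symm)
          subst hl0
          exact ⟨0, by omega, by simp [hnm, h2]⟩
        · have hlne : l ≠ [] := by
            intro h; subst h; simp [hst] at h2
          have hl1 : 1 ≤ l.length := by cases l <;> simp_all
          have hmm : mm = st.1.getD (l.length - 1) 0 := by
            rw [ihlast, List.getLast?_eq_getElem?, ihlen] at h2
            simp [List.getD_eq_getElem?_getD, h2]
          rcases (ihspec (l.length - 1) (by omega)).1 with ⟨i, hi, hieq⟩
          by_cases hgt : x.2 > mm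
          · refine ⟨l.length, le_rfl, ?_⟩
            simp [hnm, h2, hgt, List.getD_eq_getElem?_getD]
          · refine ⟨i, by omega, ?_⟩
            have : newm = mm := by simp [hnm, h2, hgt]
            rw [this, hmm, hieq, List.getD_append _ _ _ _ (by omega)]
      have hnew_ub : ∀ i, i ≤ l.length → ((l ++ [x]).getD i (0,0)).2 ≤ newm := by
        intro i hi
        rcases Nat.lt_or_ge i l.length with hil | hil
        · rw [List.getD_append _ _ _ _ hil]
          rcases h2 : st.2 with _ | mm
          · have : st.1 = [] := by rw [ihlast] at h2; exact List.getLast?_eq_none_iff.mp h2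
            have : l.length = 0 := by rw [← ihlen, this]; rfl
            omega
          · have hmm : mm = st.1.getD (l.length - 1) 0 := by
              rw [ihlast, List.getLast?_eq_getElem?, ihlen] at h2
              simp [List.getD_eq_getElem?_getD, h2]
            have hub := (ihspec (l.length - 1) (by omega)).2 i (by omega)
            have hle : (l.getD i (0,0)).2 ≤ mm := by rw [hmm]; exact hub
            have hnewm : newm = if x.2 > mm then x.2 else mm := by simp [hnm, h2]
            rw [hnewm]; split_ifs <;> omega
        · have : i = l.length := by omega
          subst this
          have : ((l ++ [x]).getD l.length (0,0)) = x := by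
            simp [List.getD_eq_getElem?_getD]
          rw [this]
          rcases h2 : st.2 with _ | mm
          · simp [hnm, h2]
          · have hnewm : newm = if x.2 > mm then x.2 else mm := by simp [hnm, h2]
            rw [hnewm]; split_ifs <;> omega
      intro k hk
      rcases Nat.lt_or_ge k l.length with hkl | hkl
      · -- old entries unchanged
        have hgd : (st.1 ++ [newm]).getD k 0 = st.1.getD k 0 := List.getD_append _ _ _ _ (by omega)
        have hld : ∀ i, i ≤ k → (l ++ [x]).getD i (0,0) = l.getD i (0,0) := fun i hi =>
          List.getD_append _ _ _ _ (by omega)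
        obtain ⟨⟨i, hi, hieq⟩, hub⟩ := ihspec k hkl
        refine ⟨⟨i, hi, by rw [hgd, hld i hi]; exact hieq⟩, fun i hi => ?_⟩
        rw [hgd, hld i hi]; exact hub i hi
      · -- k = l.length : the new entry newm
        have hkeq : k = l.length := by simp at hk; omega
        subst hkeq
        have hgd : (st.1 ++ [newm]).getD l.length 0 = newm := by
          rw [List.getD_eq_getElem?_getD, ← ihlen]
          simp
        rw [hgd]
        exact ⟨hnew_mem, fun i hi => hnew_ub i (by omega)⟩


def GoodUpTo (S : List (Int × Int)) (B : Int) (m : Nat) (v : Int) : Prop :=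
  (∃ j, j < m ∧ (S.getD j (0,0)).1 < B ∧ v = (S.getD j (0,0)).2) ∨
  (∃ j, j < m ∧ ∃ k, k < j ∧ (S.getD k (0,0)).1 + (S.getD j (0,0)).1 < B ∧
    v = (S.getD k (0,0)).2 + (S.getD j (0,0)).2)

def pvUpd (o : Option Int) (x : Int) : Option Int :=
  match o with | none => some x | some b => if x > b then some x else some b

lemma maxOpt_congr {G H : Int → Prop} {o : Option Int} (h : ∀ v, G v ↔ H v)
    (hG : MaxOpt G o) : MaxOpt H o := by
  cases o with
  | none => exact fun v hv => hG v ((h v).mpr hv)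
  | some b => exact ⟨(h b).mp hG.1, fun v hv => hG.2 v ((h v).mpr hv)⟩

lemma maxOpt_upd {G H : Int → Prop} {o : Option Int} (hG : MaxOpt G o)
    (x : Int) (hx : H x) (hub : ∀ v, H v → v ≤ x) :
    MaxOpt (fun v => G v ∨ H v) (pvUpd o x) := by
  unfold pvUpd
  cases o with
  | none =>
      refine ⟨Or.inr hx, fun v hv => ?_⟩
      rcases hv with hv | hv
      · exact absurd hv (hG v)
      · exact hub v hv
  | some b =>
      show MaxOpt (fun v => G v ∨ H v) (if x > b then some x else some b)
      obtain ⟨hGb, hubG⟩ := hG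
      by_cases hgt : x > b
      · rw [if_pos hgt]
        refine ⟨Or.inr hx, fun v hv => ?_⟩
        rcases hv with hv | hv
        · exact le_of_lt (lt_of_le_of_lt (hubG v hv) hgt)
        · exact hub v hv
      · rw [if_neg hgt]
        refine ⟨Or.inl hGb, fun v hv => ?_⟩
        rcases hv with hv | hv
        · exact hubG v hv
        · exact le_trans (hub v hv) (by omega)

lemma map_fst_getD (S : List (Int × Int)) (k : Nat) (hk : k < S.length) :
    (S.map (fun p => p.1)).getD k 0 = (S.getD k (0,0)).1 := by
  rw [List.getD_eq_getElem _ _ (by simpa using hk), List.getD_eq_getElem _ _ hk, List.getElem_map]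

lemma goodUpTo_succ (S : List (Int × Int)) (B : Int) (m : Nat) (v : Int) :
    GoodUpTo S B (m + 1) v ↔
      (GoodUpTo S B m v ∨ ((S.getD m (0,0)).1 < B ∧ v = (S.getD m (0,0)).2)) ∨
      (∃ k, k < m ∧ (S.getD k (0,0)).1 + (S.getD m (0,0)).1 < B ∧
        v = (S.getD k (0,0)).2 + (S.getD m (0,0)).2) := by
  unfold GoodUpTo
  constructor
  · rintro (⟨j, hj, hc, rfl⟩ | ⟨j, hj, k, hk, hc, rfl⟩)
    · rcases Nat.lt_or_ge j m with h | h
      · exact Or.inl (Or.inl (Or.inl ⟨j, h, hc, rfl⟩))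
      · have : j = m := by omega
        subst this
        exact Or.inl (Or.inr ⟨hc, rfl⟩)
    · rcases Nat.lt_or_ge j m with h | h
      · exact Or.inl (Or.inl (Or.inr ⟨j, h, k, hk, hc, rfl⟩))
      · have : j = m := by omega
        subst this
        exact Or.inr ⟨k, hk, hc, rfl⟩
  · rintro (((⟨j, hj, hc, rfl⟩ | ⟨j, hj, k, hk, hc, rfl⟩) | ⟨hc, rfl⟩) | ⟨k, hk, hc, rfl⟩)
    · exact Or.inl ⟨j, by omega, hc, rfl⟩
    · exact Or.inr ⟨j, by omega, k, hk, hc, rfl⟩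
    · exact Or.inl ⟨m, by omega, hc, rfl⟩
    · exact Or.inr ⟨m, by omega, k, hk, hc, rfl⟩

lemma step_inv (S : List (Int × Int)) (B : Int) (m : Nat) (hm : m < S.length)
    (hsort : ∀ p q : Nat, p ≤ q → q < S.length →
      (S.map (fun p => p.1)).getD p 0 ≤ (S.map (fun p => p.1)).getD q 0)
    (best : Option Int) (hbest : MaxOpt (GoodUpTo S B m) best) :
    MaxOpt (GoodUpTo S B (m + 1))
      (pvStep B (S.map (fun p => p.1)) (S.foldl pvPrefStep ([], none)).1 best (S[m], m)) := by
  obtain ⟨hpml, _, hpmspec⟩ := pfold_spec S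
  set cs := S.map (fun p => p.1) with hcs
  set pm := (S.foldl pvPrefStep ([], none)).1 with hpm
  have hcsl : cs.length = S.length := by simp [hcs]
  have hSm : S.getD m (0,0) = S[m] := List.getD_eq_getElem _ _ hm
  obtain ⟨hrle, hrlt, hrge⟩ := pvBsearch_spec cs (B - (S.getD m (0,0)).1) m (by omega)
    (fun p q hpq hq => hsort p q hpq (by omega)) 0 m (Nat.zero_le m) le_rfl
    (by omega) (fun k hk1 hk2 => by omega)
  set r := pvBsearch cs (B - (S.getD m (0,0)).1) 0 m with hr
  have hpair_iff : ∀ v, (∃ k, k < m ∧ (S.getD k (0,0)).1 + (S.getD m (0,0)).1 < B ∧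
      v = (S.getD k (0,0)).2 + (S.getD m (0,0)).2) ↔
      (∃ k, k < r ∧ v = (S.getD k (0,0)).2 + (S.getD m (0,0)).2) := by
    intro v
    constructor
    · rintro ⟨k, hk, hkc, rfl⟩
      refine ⟨k, ?_, rfl⟩
      by_contra hge
      have := hrge k (by omega) hk
      rw [map_fst_getD S k (by omega)] at this
      omega
    · rintro ⟨k, hk, rfl⟩
      have := hrlt k hk
      rw [map_fst_getD S k (by omega)] at this
      exact ⟨k, by omega, by omega, rfl⟩
  have h1 : MaxOpt (fun v => GoodUpTo S B m v ∨
      ((S.getD m (0,0)).1 < B ∧ v = (S.getD m (0,0)).2))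
      (if (S.getD m (0,0)).1 < B then pvUpd best (S.getD m (0,0)).2 else best) := by
    by_cases hcB : (S.getD m (0,0)).1 < B
    · rw [if_pos hcB]
      exact maxOpt_upd hbest (S.getD m (0,0)).2 ⟨hcB, rfl⟩ (fun v hv => by omega)
    · rw [if_neg hcB]
      refine maxOpt_congr (fun v => ⟨Or.inl, ?_⟩) hbest
      rintro (h | ⟨h1, h2⟩)
      · exact h
      · exact absurd h1 hcB
  have hstep : pvStep B cs pm best (S[m], m) =
      (if 0 < r then
        pvUpd (if (S.getD m (0,0)).1 < B then pvUpd best (S.getD m (0,0)).2 else best)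
          (pm.getD (r - 1) 0 + (S.getD m (0,0)).2)
       else (if (S.getD m (0,0)).1 < B then pvUpd best (S.getD m (0,0)).2 else best)) := by
    simp only [pvStep, pvUpd, hSm, hr]
  rw [hstep]
  have hres : MaxOpt (fun v => (GoodUpTo S B m v ∨
      ((S.getD m (0,0)).1 < B ∧ v = (S.getD m (0,0)).2)) ∨
      (∃ k, k < r ∧ v = (S.getD k (0,0)).2 + (S.getD m (0,0)).2))
      (if 0 < r then
        pvUpd (if (S.getD m (0,0)).1 < B then pvUpd best (S.getD m (0,0)).2 else best)
          (pm.getD (r - 1) 0 + (S.getD m (0,0)).2)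
       else (if (S.getD m (0,0)).1 < B then pvUpd best (S.getD m (0,0)).2 else best)) := by
    by_cases hr0 : 0 < r
    · rw [if_pos hr0]
      obtain ⟨⟨i, hi, hieq⟩, hub⟩ := hpmspec (r - 1) (by omega)
      refine maxOpt_upd h1 (pm.getD (r - 1) 0 + (S.getD m (0,0)).2) ?_ ?_
      · exact ⟨i, by omega, by rw [hieq]⟩
      · rintro v ⟨k, hk, rfl⟩
        have := hub k (by omega)
        omega
    · rw [if_neg hr0]
      refine maxOpt_congr (fun v => ⟨Or.inl, ?_⟩) h1
      rintro (h | ⟨k, hk, rfl⟩)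
      · exact h
      · omega
  refine maxOpt_congr (fun v => ?_) hres
  rw [goodUpTo_succ S B m v]
  constructor
  · rintro ((h | h) | h)
    · exact Or.inl (Or.inl h)
    · exact Or.inl (Or.inr h)
    · exact Or.inr ((hpair_iff v).mpr h)
  · rintro ((h | h) | h)
    · exact Or.inl (Or.inl h)
    · exact Or.inl (Or.inr h)
    · exact Or.inr ((hpair_iff v).mp h)

lemma loop_inv (S : List (Int × Int)) (B : Int)
    (hsort : ∀ p q : Nat, p ≤ q → q < S.length →
      (S.map (fun p => p.1)).getD p 0 ≤ (S.map (fun p => p.1)).getD q 0) :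
    ∀ m, m ≤ S.length →
      MaxOpt (GoodUpTo S B m)
        (((S.take m).zipIdx).foldl
          (pvStep B (S.map (fun p => p.1)) (S.foldl pvPrefStep ([], none)).1) none) := by
  intro m
  induction m with
  | zero =>
      intro _
      simp only [List.take_zero, List.zipIdx_nil, List.foldl_nil]
      intro v hv
      rcases hv with ⟨j, hj, _⟩ | ⟨j, hj, _⟩ <;> omega
  | succ m ih =>
      intro hm1
      have hm : m < S.length := by omega
      have htake : (S.take (m + 1)).zipIdx = (S.take m).zipIdx ++ [(S[m], m)] := by
        rw [List.take_add_one, List.getElem?_eq_getElem hm]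
        rw [List.zipIdx_append]
        simp [List.length_take, Nat.min_eq_left (by omega : m ≤ S.length)]
      rw [htake, List.foldl_append]
      exact step_inv S B m hm hsort _ (ih (by omega))

lemma B_resOf (costs capacity : List Int) (budget : Int) :
    ResOf (Good (PySem.List.sorted (costs.zip capacity) (fun t => t.1) false) budget)
      (maxCapacity_alt costs capacity budget) := by
  set S := PySem.List.sorted (costs.zip capacity) (fun t => t.1) false with hS
  have hsort : ∀ p q : Nat, p ≤ q → q < S.length →
      (S.map (fun p => p.1)).getD p 0 ≤ (S.map (fun p => p.1)).getD q 0 := by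
    intro p q hpq hq
    have hq' : q < (PySem.List.sorted (costs.zip capacity) (fun t => t.1) false).length := by
      rw [← hS]; exact hq
    rw [List.getD_eq_getElem _ _ (by simpa using lt_of_le_of_lt hpq hq),
        List.getD_eq_getElem _ _ (by simpa using hq), List.getElem_map, List.getElem_map]
    exact PySem.List.key_sorted_getElem_mono (costs.zip capacity) (fun t => t.1) hpq hq'
  have hM := loop_inv S budget hsort S.length le_rfl
  rw [List.take_length] at hM
  have hiff : ∀ v, GoodUpTo S budget S.length v ↔ Good S budget v := by
    intro v
    unfold GoodUpTo Good
    constructor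
    · rintro (⟨j, hj, hc, rfl⟩ | ⟨j, hj, k, hk, hc, hv⟩)
      · refine Or.inl ⟨S.getD j (0,0), ?_, hc, rfl⟩
        rw [List.getD_eq_getElem _ _ hj]; exact List.getElem_mem _
      · exact Or.inr ((hasPair_iff_idx _ _).mpr ⟨k, j, hk, hj, hc, hv⟩)
    · rintro (⟨q, hq, hc, rfl⟩ | hp)
      · rcases List.mem_iff_getElem.mp hq with ⟨j, hj, rfl⟩
        exact Or.inl ⟨j, hj, by rw [List.getD_eq_getElem _ _ hj]; exact ⟨hc, rfl⟩⟩
      · rcases (hasPair_iff_idx _ _).mp hp with ⟨i, j, hij, hj, hc, hv⟩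
        exact Or.inr ⟨j, hj, i, hij, hc, hv⟩
  show ResOf _ (match S.zipIdx.foldl (pvStep budget (S.map (fun p => p.1)) (S.foldl pvPrefStep ([], none)).1) none with
    | none => 0 | some b => b)
  rcases hb : S.zipIdx.foldl (pvStep budget (S.map (fun p => p.1)) (S.foldl pvPrefStep ([], none)).1) none with _ | b
  · rw [hb] at hM
    rw [hb]
    exact Or.inl ⟨rfl, fun v hv => hM v ((hiff v).mpr hv)⟩
  · rw [hb] at hM
    rw [hb]
    exact Or.inr ⟨(hiff b).mp hM.1, fun v hv => hM.2 v ((hiff v).mpr hv)⟩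






lemma good_perm {L L' : List (Int × Int)} (h : L.Perm L') (B v : Int) :
    Good L B v ↔ Good L' B v := by
  unfold Good
  constructor
  · rintro (⟨q, hq, hqc⟩ | hp)
    · exact Or.inl ⟨q, h.mem_iff.mp hq, hqc⟩
    · exact Or.inr (hasPair_perm_mp (fun a b hab => ⟨by have := hab.1; omega, by have := hab.2; omega⟩) h hp)
  · rintro (⟨q, hq, hqc⟩ | hp)
    · exact Or.inl ⟨q, h.mem_iff.mpr hq, hqc⟩
    · exact Or.inr (hasPair_perm_mp (fun a b hab => ⟨by have := hab.1; omega, by have := hab.2; omega⟩) h.symm hp)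

-- ===== VERDICT (by name: the statement is the Claim_ definition above) =====
theorem maxCapacity_spec : Claim_equal_maxCapacity := by
  intro costs capacity budget _hdom hpre
  unfold Spec_maxCapacity
  exact resOf_unique
    (fun v => good_perm (PySem.List.sorted_perm (costs.zip capacity) (fun t => t.1) false).symm budget v)
    (A_resOf hpre) (B_resOf costs capacity budget)
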